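-- pv_equiv track=rewrite | github.com/Torin-Perkins/xarm-controller | maze_solving/MazeLazer.py | find_directions
-- ===== SOURCE A (Python) =====
-- def find_directions(plot):
--     """
--     translates directions into wasd inputs
--     :param plot: array of arrays that have the paths
--     :return: array of wasd characters
--     """
--     directions = []
--     direction_count = 0
--
--     prev_x = plot[0][0]
--     prev_y = plot[1][0]
--
--     # handle the initial direction
--     if plot[1][1] > prev_y:
--         current_direction = 'w'
--     elif plot[1][1] < prev_y:
--         current_direction = 's'
--     else:
--         current_direction = 'x'  # placeholder for no direction
--
--     if plot[0][1] > prev_x: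
--         current_direction = 'd'
--     elif plot[0][1] < prev_x:
--         current_direction = 'a'
--
--     direction_count += 1
--
--     for x, y in zip(plot[0][1:], plot[1][1:]):
--         # determine direction along y-axis
--         if y > prev_y:
--             y_dir = 's'
--         elif y < prev_y:
--             y_dir = 'w'
--         else:
--             y_dir = ''
--
--         # determine direction along x-axis
--         if x > prev_x:
--             x_dir = 'd'
--         elif x < prev_x:
--             x_dir = 'a'
--         else:
--             x_dir = ''
--
--         # combine directions
--         direction = y_dir if y_dir else x_dir
--
--         # check if the direction has changed or not
--         if direction != current_direction:
--             directions.append((current_direction, direction_count))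
--             current_direction = direction
--             direction_count = 1
--         else:
--             direction_count += 1
--
--         prev_x = x
--         prev_y = y
--
--     # append the last direction count
--     directions.append((current_direction, direction_count))
--
--     return directions
-- ===== SOURCE B (Python) =====
-- # Alternative decomposition: sign-pair table lookups (instead of if/elif ladders) for
-- # per-step directions, then a two-pointer run grouping loop (instead of a counter
-- # threaded through the walk).
--
-- _STEP = {(-1, -1): 'w', (0, -1): 'w', (1, -1): 'w',
--          (-1, 0): 'a', (0, 0): '', (1, 0): 'd',
--          (-1, 1): 's', (0, 1): 's', (1, 1): 's'}
--
-- _INIT = {(-1, -1): 'a', (-1, 0): 'a', (-1, 1): 'a',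
--          (1, -1): 'd', (1, 0): 'd', (1, 1): 'd',
--          (0, -1): 's', (0, 0): 'x', (0, 1): 'w'}
--
--
-- def _sign(v):
--     return (v > 0) - (v < 0)
--
--
-- def find_directions(plot):
--     xs, ys = plot[0], plot[1]
--     moves = [(_sign(x2 - x1), _sign(y2 - y1))
--              for (x1, x2), (y1, y2) in zip(zip(xs, xs[1:]), zip(ys, ys[1:]))]
--     # the first emitted direction follows the initial-step convention (x priority,
--     # inverted y letters); the walk itself re-reads every move, first one included
--     dirs = [_INIT[moves[0]]] + [_STEP[m] for m in moves]
--
--     out = []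
--     rest = dirs
--     while rest:
--         d = rest[0]
--         run = 1
--         while run < len(rest) and rest[run] == d:
--             run += 1
--         out.append((d, run))
--         rest = rest[run:]
--     return out
-- ===== Notes on version B (the rewrite author's own statement) =====
-- stated objective: alternative
-- what changed: B maps each step's coordinate-delta sign pair through lookup tables (a separate x-priority table for the initial step) instead of A's if/elif ladders, and groups equal runs with a two-pointer scan-ahead loop over the direction list instead of A's direction/count state threaded through the walk.
import Mathlib
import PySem

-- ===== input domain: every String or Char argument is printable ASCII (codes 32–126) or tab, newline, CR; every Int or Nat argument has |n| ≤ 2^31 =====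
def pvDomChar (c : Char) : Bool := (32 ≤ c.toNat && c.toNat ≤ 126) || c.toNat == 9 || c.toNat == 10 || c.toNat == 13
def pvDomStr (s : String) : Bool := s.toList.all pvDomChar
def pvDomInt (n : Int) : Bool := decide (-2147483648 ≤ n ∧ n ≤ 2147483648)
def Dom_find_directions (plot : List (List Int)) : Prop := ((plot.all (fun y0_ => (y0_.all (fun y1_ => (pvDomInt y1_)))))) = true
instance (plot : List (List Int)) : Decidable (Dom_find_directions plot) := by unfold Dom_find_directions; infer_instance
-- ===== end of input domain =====

-- B replaces A's single stateful walk by sign-pair table lookups for per-step directions plus a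
-- separate run-grouping scan; return values proved equal on Pre_ (inputs where A does not raise).

-- ===== PORT A =====
-- A's loop over zip(plot[0][1:], plot[1][1:]) with state (prev, current_direction, direction_count, directions)
def findDirLoopA : Int → Int → String → Int → List (String × Int) → List (Int × Int) → List (String × Int)
  | _, _, cur, cnt, acc, [] => acc ++ [(cur, cnt)]
  | prev_x, prev_y, cur, cnt, acc, (x, y) :: rest =>
    let y_dir := if y > prev_y then "s" else if y < prev_y then "w" else ""
    let x_dir := if x > prev_x then "d" else if x < prev_x then "a" else ""
    let dir := if y_dir ≠ "" then y_dir else x_dir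
    if dir ≠ cur then findDirLoopA x y dir 1 (acc ++ [(cur, cnt)]) rest
    else findDirLoopA x y cur (cnt + 1) acc rest

def find_directions (plot : List (List Int)) : List (String × Int) :=
  let xs := plot.getD 0 []
  let ys := plot.getD 1 []
  let prev_x := xs.getD 0 0
  let prev_y := ys.getD 0 0
  let cur0 := if ys.getD 1 0 > prev_y then "w" else if ys.getD 1 0 < prev_y then "s" else "x"
  let cur := if xs.getD 1 0 > prev_x then "d" else if xs.getD 1 0 < prev_x then "a" else cur0
  findDirLoopA prev_x prev_y cur 1 [] ((xs.drop 1).zip (ys.drop 1))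

-- ===== PORT B =====
def pySign (v : Int) : Int := (if v > 0 then (1 : Int) else 0) - (if v < 0 then 1 else 0)

-- Source B's module-level direction tables (keys are always sign pairs in {-1,0,1}², so every
-- lookup hits; the getD defaults below are unreachable under Pre_)
def stepTable : PySem.Dict (Int × Int) String := PySem.Dict.ofList
  [((-1, -1), "w"), ((0, -1), "w"), ((1, -1), "w"),
   ((-1, 0), "a"), ((0, 0), ""), ((1, 0), "d"),
   ((-1, 1), "s"), ((0, 1), "s"), ((1, 1), "s")]

def initTable : PySem.Dict (Int × Int) String := PySem.Dict.ofList
  [((-1, -1), "a"), ((-1, 0), "a"), ((-1, 1), "a"),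
   ((1, -1), "d"), ((1, 0), "d"), ((1, 1), "d"),
   ((0, -1), "s"), ((0, 0), "x"), ((0, 1), "w")]

-- Source B's outer while loop: peel one run at a time; the inner while (scan forward while
-- equal) is the takeWhile/dropWhile pair over the tail
def rleRuns : List (String × Int) → List String → List (String × Int)
  | out, [] => out
  | out, d :: ds =>
    let run : Int := 1 + ((ds.takeWhile (fun e => e == d)).length : Int)
    rleRuns (out ++ [(d, run)]) (ds.dropWhile (fun e => e == d))
termination_by _ ds => ds.length
decreasing_by
  simpa using Nat.lt_succ_of_le (List.length_dropWhile_le _ _)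

def find_directions_alt (plot : List (List Int)) : List (String × Int) :=
  let xs := plot.getD 0 []
  let ys := plot.getD 1 []
  let moves := ((xs.zip (xs.drop 1)).zip (ys.zip (ys.drop 1))).map
    (fun p => (pySign (p.1.2 - p.1.1), pySign (p.2.2 - p.2.1)))
  let dirs := (initTable.getD (moves.getD 0 (0, 0)) "x") ::
    moves.map (fun m => stepTable.getD m "")
  rleRuns [] dirs

-- ===== PRECONDITION & SPEC =====
-- A indexes plot[0], plot[1] and elements 0 and 1 of both rows; it raises IndexError otherwise.
def Pre_find_directions (plot : List (List Int)) : Prop :=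
  2 ≤ plot.length ∧ 2 ≤ (plot.getD 0 []).length ∧ 2 ≤ (plot.getD 1 []).length
instance (plot : List (List Int)) : Decidable (Pre_find_directions plot) := by
  unfold Pre_find_directions; infer_instance
def pvWitness_find_directions : List (List Int) := [[0, 1, 2, 2], [0, 0, 0, 1]]

def Spec_find_directions (plot : List (List Int)) (out : List (String × Int)) : Prop := out = find_directions_alt plot
instance (plot : List (List Int)) (out : List (String × Int)) : Decidable (Spec_find_directions plot out) := by unfold Spec_find_directions; infer_instance

-- ===== CLAIM (what is proved, stated in full; the proofs are below) =====
def Claim_equal_find_directions : Prop := ∀ (plot : List (List Int)), Dom_find_directions plot → Pre_find_directions plot → Spec_find_directions plot (find_directions plot)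

-- ===== LEMMAS AND PROOFS =====

-- canonical per-step direction (y-priority, the loop's convention)
def stepDirB (p q : Int × Int) : String :=
  if q.2 > p.2 then "s"
  else if q.2 < p.2 then "w"
  else if q.1 > p.1 then "d"
  else if q.1 < p.1 then "a"
  else ""

-- canonical run-length encoding continuing a run (c, k)
def rleAux : String → Int → List String → List (String × Int)
  | c, k, [] => [(c, k)]
  | c, k, d :: ds => if d = c then rleAux c (k + 1) ds else (c, k) :: rleAux d 1 ds

-- accumulator-free version of rleRuns
def rleSpan : List String → List (String × Int)
  | [] => []
  | d :: ds =>
    ((d, 1 + ((ds.takeWhile (fun e => e == d)).length : Int))) ::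
      rleSpan (ds.dropWhile (fun e => e == d))
termination_by ds => ds.length
decreasing_by
  simpa using Nat.lt_succ_of_le (List.length_dropWhile_le _ _)

-- direction of each step, A's loop formula
def dirsA : Int → Int → List (Int × Int) → List String
  | _, _, [] => []
  | px, py, (x, y) :: rest => stepDirB (px, py) (x, y) :: dirsA x y rest

theorem loopA_eq_rleAux (steps : List (Int × Int)) :
    ∀ (px py : Int) (cur : String) (cnt : Int) (acc : List (String × Int)),
    findDirLoopA px py cur cnt acc steps = acc ++ rleAux cur cnt (dirsA px py steps) := by
  induction steps with
  | nil => intro px py cur cnt acc; simp [findDirLoopA, dirsA, rleAux]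
  | cons hd tl ih =>
    intro px py cur cnt acc
    obtain ⟨x, y⟩ := hd
    have hdir : (if (if y > py then "s" else if y < py then "w" else "") ≠ "" then
        (if y > py then "s" else if y < py then "w" else "")
        else (if x > px then "d" else if x < px then "a" else ""))
        = stepDirB (px, py) (x, y) := by
      simp only [stepDirB]
      split_ifs <;> simp_all
    simp only [findDirLoopA, dirsA, hdir, rleAux]
    by_cases h : stepDirB (px, py) (x, y) = cur
    · simp [h, ih]
    · simp [h, ih]

theorem rleRuns_eq_rleSpan (ds : List String) :
    ∀ (out : List (String × Int)), rleRuns out ds = out ++ rleSpan ds := by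
  induction ds using rleSpan.induct with
  | case1 => intro out; simp [rleRuns, rleSpan]
  | case2 d ds ih =>
    intro out
    rw [rleRuns, rleSpan, ih]
    simp

theorem rleAux_eq_rleSpan (ds : List String) :
    ∀ (c : String) (k : Int),
    rleAux c k ds =
      (c, k + ((ds.takeWhile (fun e => e == c)).length : Int)) ::
        rleSpan (ds.dropWhile (fun e => e == c)) := by
  induction ds with
  | nil => intro c k; simp [rleAux, rleSpan]
  | cons d ds ih =>
    intro c k
    by_cases h : d = c
    · subst h
      rw [rleAux, if_pos rfl, ih d (k + 1)]
      simp [List.takeWhile, List.dropWhile]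
      ring_nf
    · have hbe : (d == c) = false := by simp [h]
      rw [rleAux, if_neg h]
      have hspan : rleSpan (d :: ds) = rleAux d 1 ds := by
        rw [rleSpan, ih d 1]
      simp [List.takeWhile, List.dropWhile, hbe, hspan]

theorem step_lookup (px py x y : Int) :
    stepTable.getD (pySign (x - px), pySign (y - py)) "" = stepDirB (px, py) (x, y) := by
  rcases lt_trichotomy x px with hx | hx | hx <;>
    rcases lt_trichotomy y py with hy | hy | hy <;>
    (simp only [pySign, stepDirB]; split_ifs <;> first | omega | decide)

theorem init_lookup (x0 y0 x1 y1 : Int) :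
    initTable.getD (pySign (x1 - x0), pySign (y1 - y0)) "x" =
      (if x1 > x0 then "d" else if x1 < x0 then "a"
       else if y1 > y0 then "w" else if y1 < y0 then "s" else "x") := by
  rcases lt_trichotomy x1 x0 with hx | hx | hx <;>
    rcases lt_trichotomy y1 y0 with hy | hy | hy <;>
    (simp only [pySign]; split_ifs <;> first | omega | decide)

theorem dirsA_zip (xt yt : List Int) :
    ∀ (x0 y0 : Int),
    dirsA x0 y0 (xt.zip yt) =
      (((x0 :: xt).zip xt).zip ((y0 :: yt).zip yt)).map
        (fun p => stepDirB (p.1.1, p.2.1) (p.1.2, p.2.2)) := by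
  induction xt generalizing yt with
  | nil => intro x0 y0; simp [dirsA]
  | cons x1 xt ih =>
    intro x0 y0
    cases yt with
    | nil => simp [dirsA]
    | cons y1 yt =>
      simp only [List.zip_cons_cons, dirsA, List.map_cons]
      exact congrArg _ (ih yt x1 y1)

-- ===== VERDICT (by name: the statement is the Claim_ definition above) =====
theorem find_directions_spec : Claim_equal_find_directions := by
  intro plot _ hpre
  obtain ⟨h2, hx, hy⟩ := hpre
  match plot, h2 with
  | r0 :: r1 :: rest, _ =>
    simp only [List.getD_cons_zero, List.getD_cons_succ] at hx hy
    match r0, hx with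
    | x0 :: x1 :: xs', _ =>
    match r1, hy with
    | y0 :: y1 :: ys', _ =>
      show Spec_find_directions _ _
      unfold Spec_find_directions find_directions find_directions_alt
      simp only [List.getD_cons_zero, List.getD_cons_succ, List.drop_succ_cons,
        List.drop_zero, List.zip_cons_cons, List.map_cons, List.map_map]
      rw [loopA_eq_rleAux, List.nil_append, rleRuns_eq_rleSpan, List.nil_append,
        rleSpan, ← rleAux_eq_rleSpan]
      have hfun : (fun p : (Int × Int) × (Int × Int) =>
            stepTable.getD (pySign (p.1.2 - p.1.1), pySign (p.2.2 - p.2.1)) "")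
          = (fun p => stepDirB (p.1.1, p.2.1) (p.1.2, p.2.2)) :=
        funext fun p => step_lookup p.1.1 p.2.1 p.1.2 p.2.2
      have hd := dirsA_zip (x1 :: xs') (y1 :: ys') x0 y0
      simp only [List.zip_cons_cons, List.map_cons] at hd
      rw [hd, init_lookup x0 y0 x1 y1, step_lookup x0 y0 x1 y1]
      simp only [Function.comp_def]
      rw [hfun]
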